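-- pv_equiv track=rewrite | github.com/Shiqan/Vainglorious | commons.py | hero_determine_buildpath
-- ===== SOURCE A (Python) =====
-- def hero_determine_buildpath(build):
--     wp = 0
--     cp = 0
--     ut = 0
--     if build == []:
--         return None
--
--     for item in build.split(', '):
--         if item in ["Broken Myth", "Shatterglass", "Frostburn", "Alternating Current", "Eve of Harvast", "Aftershock"]:
--             cp += 1
--
--         if item in ["Breaking Point", "Sorrowblade", "Tyrant's Monocle", "Tornado Trigger", "Serpent Mask", "Bonesaw"]:
--             wp += 1
--
--         if item in ["Fountain of Renewal", "Crucible", "War Treads", "Nullwave Gauntlet", "Contraption", "Atlas Pauldron"]: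
--             ut += 1
--
--     if cp > wp and cp > ut:
--         return "CP"
--     if wp > cp and wp > ut:
--         return "WP"
--     if ut > cp and ut > wp:
--         return "UT"
--
--     return None
-- ===== SOURCE B (Python) =====
-- CP_ITEMS = ["Broken Myth", "Shatterglass", "Frostburn", "Alternating Current", "Eve of Harvast", "Aftershock"]
-- WP_ITEMS = ["Breaking Point", "Sorrowblade", "Tyrant's Monocle", "Tornado Trigger", "Serpent Mask", "Bonesaw"]
-- UT_ITEMS = ["Fountain of Renewal", "Crucible", "War Treads", "Nullwave Gauntlet", "Contraption", "Atlas Pauldron"]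
--
--
-- def hero_determine_buildpath(build):
--     if build == []:
--         return None
--     tokens = build.split(', ')
--     ranking = sorted(
--         [(sum(tokens.count(i) for i in CP_ITEMS), "CP"),
--          (sum(tokens.count(i) for i in WP_ITEMS), "WP"),
--          (sum(tokens.count(i) for i in UT_ITEMS), "UT")],
--         key=lambda p: p[0], reverse=True)
--     if ranking[0][0] > ranking[1][0]:
--         return ranking[0][1]
--     return None
-- ===== Notes on version B (the rewrite author's own statement) =====
-- stated objective: alternative
-- what changed: Inverts the loops — instead of one pass over the tokens testing three hard-coded memberships, B counts each known item's occurrences in the token list and sums them per category — and replaces the three pairwise strict-comparison chains with a descending sort of the three (score, label) pairs, returning the top label only when it strictly beats the runner-up.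
import Mathlib
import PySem

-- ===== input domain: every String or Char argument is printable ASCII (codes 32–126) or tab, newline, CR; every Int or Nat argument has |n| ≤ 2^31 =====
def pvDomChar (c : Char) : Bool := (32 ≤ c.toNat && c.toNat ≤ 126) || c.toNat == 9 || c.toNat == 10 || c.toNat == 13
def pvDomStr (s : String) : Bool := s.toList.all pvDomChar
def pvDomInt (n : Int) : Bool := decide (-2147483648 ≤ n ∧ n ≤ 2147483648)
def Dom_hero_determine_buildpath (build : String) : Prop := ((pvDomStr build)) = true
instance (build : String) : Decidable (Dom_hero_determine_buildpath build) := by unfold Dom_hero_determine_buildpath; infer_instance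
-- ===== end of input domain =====

-- B is a different decomposition: instead of one pass over the tokens testing three memberships,
-- it counts each known item's occurrences in the token list (loops inverted), then sorts the three
-- (score, label) pairs descending and returns the top label only when it strictly beats the runner-up.
-- (Python's `build == []` guard is always False for a string argument, so it is not a branch here.)

-- ===== PORT A =====
def cpItems : List String := ["Broken Myth", "Shatterglass", "Frostburn", "Alternating Current", "Eve of Harvast", "Aftershock"]
def wpItems : List String := ["Breaking Point", "Sorrowblade", "Tyrant's Monocle", "Tornado Trigger", "Serpent Mask", "Bonesaw"]
def utItems : List String := ["Fountain of Renewal", "Crucible", "War Treads", "Nullwave Gauntlet", "Contraption", "Atlas Pauldron"]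

def hero_determine_buildpath (build : String) : Option String :=
  -- wp = cp = ut = 0; `if build == []` is str-vs-list, always False
  let s : Int × Int × Int := ((PySem.Str.split? build ", ").getD []).foldl
    (fun (s : Int × Int × Int) item =>
      let s := if cpItems.contains item then (s.1 + 1, s.2.1, s.2.2) else s
      let s := if wpItems.contains item then (s.1, s.2.1 + 1, s.2.2) else s
      if utItems.contains item then (s.1, s.2.1, s.2.2 + 1) else s)
    ((0 : Int), (0 : Int), (0 : Int))
  let cp := s.1; let wp := s.2.1; let ut := s.2.2
  if cp > wp ∧ cp > ut then some "CP"
  else if wp > cp ∧ wp > ut then some "WP"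
  else if ut > cp ∧ ut > wp then some "UT"
  else none

-- ===== PORT B =====
-- sum(tokens.count(i) for i in items)
def scoreOf (tokens : List String) (items : List String) : Int :=
  (items.map (fun i => (tokens.count i : Int))).sum

def hero_determine_buildpath_alt (build : String) : Option String :=
  let tokens := (PySem.Str.split? build ", ").getD []
  let ranking := PySem.List.sorted
    [(scoreOf tokens cpItems, "CP"), (scoreOf tokens wpItems, "WP"), (scoreOf tokens utItems, "UT")]
    (fun p => p.1) true
  let r0 := PySem.List.pyGetD ranking 0 ((0 : Int), "")
  let r1 := PySem.List.pyGetD ranking 1 ((0 : Int), "")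
  if r0.1 > r1.1 then some r0.2 else none

-- ===== PRECONDITION & SPEC =====
def Spec_hero_determine_buildpath (build : String) (out : Option String) : Prop := out = hero_determine_buildpath_alt build
instance (build : String) (out : Option String) : Decidable (Spec_hero_determine_buildpath build out) := by unfold Spec_hero_determine_buildpath; infer_instance

-- ===== CLAIM (what is proved, stated in full; the proofs are below) =====
def Claim_equal_hero_determine_buildpath : Prop := ∀ (build : String), Dom_hero_determine_buildpath build → Spec_hero_determine_buildpath build (hero_determine_buildpath build)

-- ===== LEMMAS AND PROOFS =====

-- Each category score grows by the count of one consumed token.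
theorem score_step (items : List String) (x : String) (ts : List String) :
    scoreOf (x :: ts) items = scoreOf ts items + (items.count x : Int) := by
  induction items with
  | nil => simp [scoreOf]
  | cons j js ih =>
      by_cases h : j = x
      · subst h
        simp [scoreOf, List.count_cons] at ih ⊢
        omega
      · simp [scoreOf, List.count_cons, h, Ne.symm h] at ih ⊢
        omega

-- On a duplicate-free item list the count of a token is its membership indicator.
theorem count_nodup (l : List String) (hl : l.Nodup) (x : String) :
    (l.count x : Int) = if l.contains x then 1 else 0 := by
  by_cases h : x ∈ l
  · simp [h, List.count_eq_one_of_mem hl h]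
  · simp [h, List.count_eq_zero_of_not_mem h]

-- A's counting fold equals B's three inverted-count scores.
theorem fold_eq_scores (tokens : List String) (a b c : Int) :
    tokens.foldl
      (fun (s : Int × Int × Int) item =>
        let s := if cpItems.contains item then (s.1 + 1, s.2.1, s.2.2) else s
        let s := if wpItems.contains item then (s.1, s.2.1 + 1, s.2.2) else s
        if utItems.contains item then (s.1, s.2.1, s.2.2 + 1) else s)
      (a, b, c) =
    (a + scoreOf tokens cpItems, b + scoreOf tokens wpItems, c + scoreOf tokens utItems) := by
  induction tokens generalizing a b c with
  | nil => simp [scoreOf]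
  | cons x ts ih =>
      simp only [List.foldl_cons]
      rw [score_step, score_step, score_step,
        count_nodup cpItems (by decide) x, count_nodup wpItems (by decide) x,
        count_nodup utItems (by decide) x]
      by_cases h1 : cpItems.contains x <;> by_cases h2 : wpItems.contains x <;> by_cases h3 : utItems.contains x <;>
        simp only [h1, h2, h3, if_true, if_false, Bool.false_eq_true, ih, Prod.mk.injEq] <;>
        refine ⟨by omega, by omega, by omega⟩

-- The sort-then-compare decision equals A's strict-comparison chain.
theorem decision_eq (a b c : Int) :
    (let ranking := PySem.List.sorted [(a, "CP"), (b, "WP"), (c, "UT")] (fun p : Int × String => p.1) true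
     let r0 := PySem.List.pyGetD ranking 0 ((0 : Int), "")
     let r1 := PySem.List.pyGetD ranking 1 ((0 : Int), "")
     if r0.1 > r1.1 then some r0.2 else none) =
    (if a > b ∧ a > c then some "CP"
     else if b > a ∧ b > c then some "WP"
     else if c > a ∧ c > b then some "UT"
     else (none : Option String)) := by
  rw [PySem.List.sorted_rev_eq_foldl_insertBy]
  simp only [List.foldl_cons, List.foldl_nil]
  by_cases hab : a < b <;> by_cases hac : a < c <;> by_cases hbc : b < c <;>
    simp [PySem.List.insertBy, PySem.List.pyGetD, hab, hac, hbc] <;>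
    (try omega) <;> split_ifs <;> simp_all <;> omega

-- ===== VERDICT (by name: the statement is the Claim_ definition above) =====
theorem hero_determine_buildpath_spec : Claim_equal_hero_determine_buildpath := by
  intro build _
  unfold Spec_hero_determine_buildpath hero_determine_buildpath hero_determine_buildpath_alt
  rw [fold_eq_scores ((PySem.Str.split? build ", ").getD []) 0 0 0]
  simp only [zero_add]
  exact (decision_eq _ _ _).symm
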